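-- pv_equiv track=rewrite | github.com/eliran0220/Intro-to-AI-ex2 | DecisionTree.py | get_yes_no_labels_count
-- ===== SOURCE A (Python) =====
-- def get_yes_no_labels_count(examples):
--     """
--     Counting number of yes and no
--     :param examples: all examples
--     :return: yes,no numbers
--     """
--     num_yes = 0
--     num_no = 0
--     for example in examples:
--         if example[-1] == 'yes':
--             num_yes += 1
--         else:
--             num_no += 1
--     return num_yes, num_no
-- ===== SOURCE B (Python) =====
-- def get_yes_no_labels_count(examples):
--     """Divide-and-conquer recount: split the example list in half, count each
--     half recursively, and add the pairs; a singleton is (1,0) or (0,1)."""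
--     ex = list(examples)
--
--     def go(lo, hi):
--         if lo == hi:
--             return (0, 0)
--         if hi - lo == 1:
--             return (1, 0) if ex[lo][-1] == 'yes' else (0, 1)
--         mid = (lo + hi) // 2
--         y1, n1 = go(lo, mid)
--         y2, n2 = go(mid, hi)
--         return (y1 + y2, n1 + n2)
--
--     return go(0, len(ex))
-- ===== Notes on version B (the rewrite author's own statement) =====
-- stated objective: alternative
-- what changed: Replaces the single-pass dual-accumulator loop by a recursive divide-and-conquer: split the list in half, count each half recursively, and add the resulting (yes,no) pairs; correctness follows because the counts are additive over concatenation.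
import Mathlib
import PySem

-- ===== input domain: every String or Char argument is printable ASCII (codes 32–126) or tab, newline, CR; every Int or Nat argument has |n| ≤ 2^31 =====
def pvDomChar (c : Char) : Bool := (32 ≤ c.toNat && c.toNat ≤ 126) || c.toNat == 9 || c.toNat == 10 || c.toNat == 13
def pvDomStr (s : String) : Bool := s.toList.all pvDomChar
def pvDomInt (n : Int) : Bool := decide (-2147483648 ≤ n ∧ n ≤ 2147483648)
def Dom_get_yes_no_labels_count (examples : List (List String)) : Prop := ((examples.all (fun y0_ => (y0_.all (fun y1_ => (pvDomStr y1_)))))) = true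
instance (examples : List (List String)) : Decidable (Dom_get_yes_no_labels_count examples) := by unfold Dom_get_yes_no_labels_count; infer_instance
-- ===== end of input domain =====

-- B counts by divide-and-conquer (halve the list, count each half recursively, add the pairs) instead of A's single dual-accumulator loop.
-- ===== PORT A =====
def get_yes_no_labels_count (examples : List (List String)) : Int × Int :=
  examples.foldl
    (fun (acc : Int × Int) ex =>
      if PySem.List.pyGet? ex (-1) = some "yes" then (acc.1 + 1, acc.2)
      else (acc.1, acc.2 + 1))
    (0, 0)

-- ===== PORT B =====
-- Source B's go(lo, hi) recurses on a half-open segment of the fixed list; the faithful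
-- list-level transcription recurses on the corresponding sublist (take/drop at mid).
def pvGoB (l : List (List String)) : Int × Int :=
  match l with
  | [] => (0, 0)
  | [e] => if PySem.List.pyGet? e (-1) = some "yes" then (1, 0) else (0, 1)
  | x :: y :: rest =>
    let l' := x :: y :: rest
    let mid := l'.length / 2
    let p1 := pvGoB (l'.take mid)
    let p2 := pvGoB (l'.drop mid)
    (p1.1 + p2.1, p1.2 + p2.2)
termination_by l.length
decreasing_by
  · simp [List.length_take]; omega
  · simp [List.length_drop]; omega

def get_yes_no_labels_count_alt (examples : List (List String)) : Int × Int :=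
  pvGoB examples

-- ===== PRECONDITION & SPEC =====
-- Pre_ excludes inputs containing an empty example, on which both Pythons raise IndexError at example[-1].
def Pre_get_yes_no_labels_count (examples : List (List String)) : Prop :=
  ∀ e ∈ examples, e ≠ []
instance (examples : List (List String)) : Decidable (Pre_get_yes_no_labels_count examples) := by
  unfold Pre_get_yes_no_labels_count; infer_instance
def pvWitness_get_yes_no_labels_count : List (List String) := [["a", "yes"], ["no"], ["b", "maybe"]]
def Spec_get_yes_no_labels_count (examples : List (List String)) (out : Int × Int) : Prop := out = get_yes_no_labels_count_alt examples
instance (examples : List (List String)) (out : Int × Int) : Decidable (Spec_get_yes_no_labels_count examples out) := by unfold Spec_get_yes_no_labels_count; infer_instance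

-- ===== CLAIM (what is proved, stated in full; the proofs are below) =====
def Claim_equal_get_yes_no_labels_count : Prop := ∀ (examples : List (List String)), Dom_get_yes_no_labels_count examples → Pre_get_yes_no_labels_count examples → Spec_get_yes_no_labels_count examples (get_yes_no_labels_count examples)

-- ===== LEMMAS AND PROOFS =====
-- the canonical value both ports compute: (#yes labels, #other labels)
def pvCY (l : List (List String)) : Int :=
  ((l.map (fun e => PySem.List.pyGet? e (-1))).count (some "yes") : Int)

theorem pvCY_append (a b : List (List String)) : pvCY (a ++ b) = pvCY a + pvCY b := by
  simp [pvCY, List.count_append]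

theorem pv_goB_eq (l : List (List String)) :
    pvGoB l = (pvCY l, (l.length : Int) - pvCY l) := by
  induction l using pvGoB.induct with
  | case1 => simp [pvGoB, pvCY]
  | case2 e h => simp [pvGoB, pvCY, h]
  | case3 e h =>
    have hb : ((PySem.List.pyGet? e (-1) : Option String) == some "yes") = false := by
      simpa using h
    simp [pvGoB, pvCY, h, hb]
  | case4 x y rest l' mid ih1 ih2 =>
    have hl' : l' = x :: y :: rest := rfl
    have hm : mid = (x :: y :: rest).length / 2 := by rw [hl'] at *
    rw [hl', hm] at ih1 ih2
    rw [pvGoB]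
    rw [ih1, ih2]
    have hsplit := List.take_append_drop ((x :: y :: rest).length / 2) (x :: y :: rest)
    have hc : pvCY (x :: y :: rest)
        = pvCY ((x :: y :: rest).take ((x :: y :: rest).length / 2))
          + pvCY ((x :: y :: rest).drop ((x :: y :: rest).length / 2)) := by
      conv_lhs => rw [← hsplit]
      exact pvCY_append _ _
    have hl : ((x :: y :: rest).length : Int)
        = (((x :: y :: rest).take ((x :: y :: rest).length / 2)).length : Int)
          + (((x :: y :: rest).drop ((x :: y :: rest).length / 2)).length : Int) := by
      simp [List.length_take, List.length_drop]; omega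
    refine Prod.ext ?_ ?_ <;> simp only []
    · omega
    · rw [hl] at *; omega

theorem pv_foldl_counts (l : List (List String)) (a b : Int) :
    l.foldl
      (fun (acc : Int × Int) ex =>
        if PySem.List.pyGet? ex (-1) = some "yes" then (acc.1 + 1, acc.2)
        else (acc.1, acc.2 + 1))
      (a, b)
    = (a + pvCY l, b + ((l.length : Int) - pvCY l)) := by
  induction l generalizing a b with
  | nil => simp [pvCY]
  | cons h t ih =>
    simp only [List.foldl_cons]
    by_cases hh : PySem.List.pyGet? h (-1) = some "yes"
    · rw [if_pos hh, ih]
      have : pvCY (h :: t) = pvCY t + 1 := by simp [pvCY, List.count_cons, hh]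
      simp only [this, List.length_cons]
      refine Prod.ext ?_ ?_ <;> simp <;> push_cast <;> omega
    · have hb : ((PySem.List.pyGet? h (-1) : Option String) == some "yes") = false := by
        simpa using hh
      rw [if_neg hh, ih]
      have : pvCY (h :: t) = pvCY t := by simp [pvCY, List.count_cons, hb]
      simp only [this, List.length_cons]
      refine Prod.ext ?_ ?_ <;> simp <;> push_cast <;> omega

-- ===== VERDICT (by name: the statement is the Claim_ definition above) =====
theorem get_yes_no_labels_count_spec : Claim_equal_get_yes_no_labels_count := by
  intro examples _ _
  unfold Spec_get_yes_no_labels_count get_yes_no_labels_count get_yes_no_labels_count_alt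
  rw [pv_foldl_counts, pv_goB_eq]
  simp
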